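-- pv_equiv track=rewrite | github.com/schmidte7/Python_Examples | TP8_4.py | prefix_to_indices
-- ===== SOURCE A (Python) =====
-- def prefix_to_indices(strings):
--
--     prefix_dictionary = dict() # Create empty dictionary
--     prefix_list = [] # Empty list for lowercased words
--
--     for words in strings: # Iterate through the first list
--         prefix_list.append(words.lower()) # Lowercase everything and append to new list
--
--     i = 0
--     for word in prefix_list: # Iterate through the lowercased list
--         if len(word) >= 2: # If the word's length is 2 or more...
--             prefix = word[:2] # Grab the prefix of each word
--
--             if prefix in prefix_dictionary: # If the key is in the ditionary
--                 word_indice = prefix_dictionary[prefix] # Add a value to the dictionary key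
--                 word_indice.append(i) # This line adds the i (indice) if the key,value already exists
--             else:
--                 prefix_dictionary[prefix] = [i] #  If the key, value does not exist, the value is set to a list []
--         i+=1 # To iterate through the strings, need to increment by 1 for the next indice/position of the prefix (key)
--
--     return prefix_dictionary
-- ===== SOURCE B (Python) =====
-- def prefix_to_indices(strings):
--     # One comprehension pass building (prefix, index) pairs, then a dict
--     # comprehension over first-occurrence-ordered distinct prefixes.
--     pairs = [(w.lower()[:2], i) for i, w in enumerate(strings) if len(w) >= 2]
--     keys = list(dict.fromkeys(p for p, _ in pairs))
--     return {k: [i for p, i in pairs if p == k] for k in keys}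
-- ===== Notes on version B (the rewrite author's own statement) =====
-- stated objective: alternative
-- what changed: A's two imperative passes with a mutating dict accumulator and a hand-maintained counter are replaced by a single enumerate-based comprehension building (prefix, index) pairs, an ordered dedup of the prefixes, and a dict comprehension that collects each prefix's indices by filtering the pairs.
import Mathlib
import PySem

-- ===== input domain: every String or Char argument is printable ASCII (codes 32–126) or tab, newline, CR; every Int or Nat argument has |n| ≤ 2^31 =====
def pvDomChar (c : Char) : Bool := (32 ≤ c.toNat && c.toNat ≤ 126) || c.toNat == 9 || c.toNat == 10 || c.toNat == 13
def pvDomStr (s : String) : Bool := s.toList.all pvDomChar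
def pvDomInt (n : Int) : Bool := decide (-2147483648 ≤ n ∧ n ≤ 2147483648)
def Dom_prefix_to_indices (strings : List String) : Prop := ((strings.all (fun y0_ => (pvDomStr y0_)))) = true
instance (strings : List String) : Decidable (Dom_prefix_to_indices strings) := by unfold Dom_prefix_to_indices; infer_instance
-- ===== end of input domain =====

-- B replaces A's mutating dict-accumulation loop by a pairs-comprehension,
-- ordered-dedup of the prefixes, and a dict comprehension (objective: alternative).

-- ===== PORT A =====
-- A: first loop lowercases every word into prefix_list; second loop (with an
-- explicit counter i) groups indices by 2-char prefix into a dict, mutating the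
-- stored list in place (modelled by insert at the same key, which keeps position).
def prefix_to_indices (strings : List String) : List (String × List Int) :=
  let prefix_list := strings.foldl (fun acc words => acc ++ [PySem.Str.lower words]) []
  let st := prefix_list.foldl (fun (s : PySem.Dict String (List Int) × Int) word =>
    (if 2 ≤ PySem.Str.len word then
        if (s.1).contains (PySem.Str.slice word none (some 2)) then
          (s.1).insert (PySem.Str.slice word none (some 2))
            ((s.1).getD (PySem.Str.slice word none (some 2)) [] ++ [s.2])
        else (s.1).insert (PySem.Str.slice word none (some 2)) [s.2]
      else s.1, s.2 + 1)) (PySem.Dict.empty, 0)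
  st.1.items

-- ===== PORT B =====
def prefix_to_indices_alt (strings : List String) : List (String × List Int) :=
  let pairs := (PySem.List.enumerate strings).filterMap (fun p =>
    if 2 ≤ PySem.Str.len p.2 then
      some (PySem.Str.slice (PySem.Str.lower p.2) none (some 2), p.1)
    else none)
  let keys := PySem.List.dedup (pairs.map (·.1))
  keys.map (fun k => (k, (pairs.filter (fun p => p.1 == k)).map (·.2)))

-- ===== PRECONDITION & SPEC =====
def Spec_prefix_to_indices (strings : List String) (out : List (String × List Int)) : Prop := out = prefix_to_indices_alt strings
instance (strings : List String) (out : List (String × List Int)) : Decidable (Spec_prefix_to_indices strings out) := by unfold Spec_prefix_to_indices; infer_instance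

-- ===== CLAIM (what is proved, stated in full; the proofs are below) =====
def Claim_equal_prefix_to_indices : Prop := ∀ (strings : List String), Dom_prefix_to_indices strings → Spec_prefix_to_indices strings (prefix_to_indices strings)

-- ===== LEMMAS AND PROOFS =====

-- A's second loop, carrying its explicit counter i, is the fold over enumerate.
theorem prefA_loop (l : List String) (d : PySem.Dict String (List Int)) (i : Int) :
    (l.foldl (fun (s : PySem.Dict String (List Int) × Int) word =>
      (if 2 ≤ PySem.Str.len word then
        if (s.1).contains (PySem.Str.slice word none (some 2)) then
          (s.1).insert (PySem.Str.slice word none (some 2))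
            ((s.1).getD (PySem.Str.slice word none (some 2)) [] ++ [s.2])
        else (s.1).insert (PySem.Str.slice word none (some 2)) [s.2]
      else s.1, s.2 + 1)) (d, i)).1
    = (PySem.List.enumerate l i).foldl (fun d (p : Int × String) =>
        if 2 ≤ PySem.Str.len p.2 then
          if d.contains (PySem.Str.slice p.2 none (some 2)) then
            d.insert (PySem.Str.slice p.2 none (some 2))
              (d.getD (PySem.Str.slice p.2 none (some 2)) [] ++ [p.1])
          else d.insert (PySem.Str.slice p.2 none (some 2)) [p.1]
        else d) d := by
  induction l generalizing d i with
  | nil => rfl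
  | cons x t ih =>
      simp only [List.foldl_cons, PySem.List.enumerate_cons]
      exact ih _ _

theorem enumerate_map {α β : Type} (f : α → β) (l : List α) (i : Int) :
    PySem.List.enumerate (l.map f) i
      = (PySem.List.enumerate l i).map (fun p => (p.1, f p.2)) := by
  induction l generalizing i with
  | nil => simp
  | cons x t ih => simp [PySem.List.enumerate_cons, ih]

theorem filterMap_ite_some {α β : Type} (l : List α) (c : α → Prop) [DecidablePred c]
    (g : α → β) :
    l.filterMap (fun x => if c x then some (g x) else none)
      = (l.filter (fun x => decide (c x))).map g := by
  induction l with
  | nil => rfl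
  | cons x t ih => by_cases h : c x <;> simp [h, ih]

theorem len_lower (s : String) :
    PySem.Str.len (PySem.Str.lower s) = PySem.Str.len s := by
  simp [PySem.Str.len, PySem.Chars.lower]

-- ===== VERDICT (by name: the statement is the Claim_ definition above) =====
theorem prefix_to_indices_spec : Claim_equal_prefix_to_indices := by
  intro strings _
  simp only [Spec_prefix_to_indices, prefix_to_indices, prefix_to_indices_alt]
  rw [PySem.List.foldl_append_singleton_eq_map, List.nil_append, prefA_loop,
      enumerate_map, List.foldl_map, filterMap_ite_some]
  -- unify A's loop body with a `modify` loop over B's pairs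
  have hbody : (fun (d : PySem.Dict String (List Int)) (p : Int × String) =>
      (if 2 ≤ PySem.Str.len (PySem.Str.lower p.2) then
        if d.contains (PySem.Str.slice (PySem.Str.lower p.2) none (some 2)) then
          d.insert (PySem.Str.slice (PySem.Str.lower p.2) none (some 2))
            (d.getD (PySem.Str.slice (PySem.Str.lower p.2) none (some 2)) [] ++ [p.1])
        else d.insert (PySem.Str.slice (PySem.Str.lower p.2) none (some 2)) [p.1]
      else d))
      = (fun (d : PySem.Dict String (List Int)) (p : Int × String) =>
          if 2 ≤ PySem.Str.len p.2 then
            d.modify (PySem.Str.slice (PySem.Str.lower p.2) none (some 2)) [] (· ++ [p.1])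
          else d) := by
    funext d p
    rw [len_lower]
    by_cases h : 2 ≤ PySem.Str.len p.2
    · rw [if_pos h, if_pos h]
      simp only [PySem.Dict.modify]
      by_cases hc : d.contains (PySem.Str.slice (PySem.Str.lower p.2) none (some 2)) = true
      · rw [if_pos hc]
      · rw [if_neg hc,
            PySem.Dict.getD_of_not_contains d [] (Bool.not_eq_true _ |>.mp hc),
            List.nil_append]
    · rw [if_neg h, if_neg h]
  dsimp only
  rw [hbody]
  rw [PySem.List.foldl_ite_eq_foldl_filter
        (p := fun p : Int × String => 2 ≤ PySem.Str.len p.2)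
        (f := fun (d : PySem.Dict String (List Int)) (p : Int × String) =>
          d.modify (PySem.Str.slice (PySem.Str.lower p.2) none (some 2)) [] (· ++ [p.1]))]
  rw [show (fun (d : PySem.Dict String (List Int)) (p : Int × String) =>
        d.modify (PySem.Str.slice (PySem.Str.lower p.2) none (some 2)) [] (· ++ [p.1]))
      = fun d p => d.modify ((fun q : Int × String =>
          (PySem.Str.slice (PySem.Str.lower q.2) none (some 2), q.1)) p).1 []
          (· ++ [((fun q : Int × String =>
          (PySem.Str.slice (PySem.Str.lower q.2) none (some 2), q.1)) p).2]) from rfl,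
      ← List.foldl_map
        (f := fun q : Int × String =>
          (PySem.Str.slice (PySem.Str.lower q.2) none (some 2), q.1))
        (g := fun (d : PySem.Dict String (List Int)) (p : String × Int) =>
          d.modify p.1 [] (fun x => x ++ [p.2]))]
  set pairs := ((PySem.List.enumerate strings 0).filter
      (fun p => decide (2 ≤ PySem.Str.len p.2))).map
      (fun q : Int × String => (PySem.Str.slice (PySem.Str.lower q.2) none (some 2), q.1))
  have hnd : (pairs.foldl (fun d p => d.modify p.1 [] (· ++ [p.2])) PySem.Dict.empty).keys.Nodup := by
    exact PySem.Dict.nodup_keys_foldl_modify_key pairs (·.1) [] (fun _ p => (· ++ [p.2])) _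
      PySem.Dict.nodup_keys_empty
  rw [PySem.Dict.items_eq_map_keys _ hnd []]
  have hkeys : (pairs.foldl (fun d p => d.modify p.1 [] (· ++ [p.2])) PySem.Dict.empty).keys
      = PySem.List.dedup (pairs.map (·.1)) := by
    rw [PySem.Dict.keys_foldl_modify_key pairs (·.1) [] (fun _ p => (· ++ [p.2]))]
    simp [PySem.Set.update, PySem.Set.ofList_eq_foldl, PySem.Dict.keys_empty]
  rw [hkeys]
  refine List.map_congr_left ?_
  intro k _
  rw [PySem.Dict.getD_foldl_modify_append, PySem.Dict.getD_empty, List.nil_append]
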